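-- pv_equiv track=rewrite | github.com/cyberBOB72/dz11 | utils.py | get_by_skill
-- ===== SOURCE A (Python) =====
-- def get_by_skill(skill_name, data):
--     """
--     Вернет кандидатов по навыку.
--     """
--     sum_candidates = []
--     result = f"""<h1>Найдено со скиллом {skill_name}: """
--     for name in data:
--         if skill_name.lower() in name['skills'].lower():
--             sum_candidates.append(name['name'])
--
--     result += f"""{len(sum_candidates)}</h1><br />"""
--
--     for name in data:
--         if skill_name.lower() in name['skills'].lower():
--             result += f"""<p><a href="http://127.0.0.1:5000/candidate/{name['id']}">{name['name']}</a></p><br />"""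
--
--     return result
-- ===== SOURCE B (Python) =====
-- def get_by_skill(skill_name, data):
--     """
--     Вернет кандидатов по навыку.
--     """
--     needle = skill_name.lower()
--     count = 0
--     body = ""
--     # single pass over the records in reverse, building the body back-to-front
--     # and counting the matches at the same time
--     for name in reversed(data):
--         if needle in name['skills'].lower():
--             count += 1
--             body = f"""<p><a href="http://127.0.0.1:5000/candidate/{name['id']}">{name['name']}</a></p><br />""" + body
--     return f"""<h1>Найдено со скиллом {skill_name}: {count}</h1><br />""" + body
-- ===== Notes on version B (the rewrite author's own statement) =====
-- stated objective: alternative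
-- what changed: B makes a single reverse traversal of data, building the body string back-to-front by prepending each rendered line while counting matches in the same pass (header attached last), instead of A's two forward scans (one to collect names for the count, one to append the lines).
import Mathlib
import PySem

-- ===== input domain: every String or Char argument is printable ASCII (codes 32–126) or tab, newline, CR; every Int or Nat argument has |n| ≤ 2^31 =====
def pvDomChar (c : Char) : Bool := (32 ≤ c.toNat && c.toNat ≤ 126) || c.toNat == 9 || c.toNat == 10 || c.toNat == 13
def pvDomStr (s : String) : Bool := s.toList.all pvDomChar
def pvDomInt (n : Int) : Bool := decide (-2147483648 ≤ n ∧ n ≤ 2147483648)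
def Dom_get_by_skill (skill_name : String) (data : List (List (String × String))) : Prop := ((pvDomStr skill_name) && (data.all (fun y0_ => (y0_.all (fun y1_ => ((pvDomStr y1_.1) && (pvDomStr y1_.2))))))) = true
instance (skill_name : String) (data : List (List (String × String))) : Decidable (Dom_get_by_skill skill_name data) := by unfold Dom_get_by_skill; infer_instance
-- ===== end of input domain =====

-- B makes one reverse pass over data, prepending each rendered line and counting matches in
-- the same pass, instead of A's two forward scans; return value identical (objective: alternative).

-- shared dict primitive: Python's name[k] on a dict-as-assoc-list (first match; none = KeyError)
def pvGet? (d : List (String × String)) (k : String) : Option String :=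
  (d.find? (fun kv => kv.1 == k)).map (·.2)

-- one <p><a …> line of the output (identical f-string in both Pythons)
def pvRender (name : List (String × String)) : String :=
  "<p><a href=\"http://127.0.0.1:5000/candidate/" ++ ((pvGet? name "id").getD "") ++ "\">"
    ++ ((pvGet? name "name").getD "") ++ "</a></p><br />"

-- ===== PORT A =====
def get_by_skill (skill_name : String) (data : List (List (String × String))) : String :=
  -- first loop: collect matching names
  let sum_candidates : List String := data.foldl (fun acc name =>
    if PySem.Str.isIn (PySem.Str.lower skill_name)
        (PySem.Str.lower ((pvGet? name "skills").getD "")) then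
      acc ++ [(pvGet? name "name").getD ""]
    else acc) []
  let result := "<h1>Найдено со скиллом " ++ skill_name ++ ": "
  let result := result ++ PySem.Int.toStr (sum_candidates.length : Int) ++ "</h1><br />"
  -- second loop: re-scan data, appending a line per match
  data.foldl (fun r name =>
    if PySem.Str.isIn (PySem.Str.lower skill_name)
        (PySem.Str.lower ((pvGet? name "skills").getD "")) then
      r ++ pvRender name
    else r) result

-- ===== PORT B =====
def get_by_skill_alt (skill_name : String) (data : List (List (String × String))) : String :=
  let needle := PySem.Str.lower skill_name
  -- `for name in reversed(data)` with state (count, body), prepending each line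
  let acc : Int × String := data.reverse.foldl (fun acc name =>
    if PySem.Str.isIn needle (PySem.Str.lower ((pvGet? name "skills").getD "")) then
      (acc.1 + 1, pvRender name ++ acc.2)
    else acc) (0, "")
  "<h1>Найдено со скиллом " ++ skill_name ++ ": " ++ PySem.Int.toStr acc.1 ++ "</h1><br />" ++ acc.2

-- ===== PRECONDITION & SPEC =====
-- Pre_ excludes exactly the inputs where Python A raises KeyError: an entry without the
-- 'skills' key, or a matching entry without 'name' or 'id'.
def Pre_get_by_skill (skill_name : String) (data : List (List (String × String))) : Prop :=
  ∀ d ∈ data, (pvGet? d "skills").isSome = true ∧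
    (PySem.Str.isIn (PySem.Str.lower skill_name)
        (PySem.Str.lower ((pvGet? d "skills").getD "")) = true →
      (pvGet? d "name").isSome = true ∧ (pvGet? d "id").isSome = true)
instance (skill_name : String) (data : List (List (String × String))) : Decidable (Pre_get_by_skill skill_name data) := by unfold Pre_get_by_skill; infer_instance

def pvWitness_get_by_skill : String × (List (List (String × String))) :=
  ("python", [[("skills", "Python, SQL"), ("name", "Ann"), ("id", "1")],
              [("skills", "Java"), ("name", "Bob"), ("id", "2")]])

def Spec_get_by_skill (skill_name : String) (data : List (List (String × String))) (out : String) : Prop := out = get_by_skill_alt skill_name data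
instance (skill_name : String) (data : List (List (String × String))) (out : String) : Decidable (Spec_get_by_skill skill_name data out) := by unfold Spec_get_by_skill; infer_instance

-- ===== CLAIM (what is proved, stated in full; the proofs are below) =====
def Claim_equal_get_by_skill : Prop := ∀ (skill_name : String) (data : List (List (String × String))), Dom_get_by_skill skill_name data → Pre_get_by_skill skill_name data → Spec_get_by_skill skill_name data (get_by_skill skill_name data)

-- ===== LEMMAS AND PROOFS =====

-- shifting the accumulator out of a string-appending foldl
theorem foldl_str_append {α : Type} (f : α → String) (l : List α) (s : String) :
    l.foldl (fun r x => r ++ f x) s = s ++ l.foldl (fun r x => r ++ f x) "" := by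
  induction l generalizing s with
  | nil => simp
  | cons x xs ih =>
    simp only [List.foldl_cons]
    rw [ih (s ++ f x), ih ("" ++ f x)]
    simp [String.append_assoc]

-- A's conditional-append loop over data equals the unconditional append loop over the matches
theorem foldl_str_append_if {α : Type} (p : α → Bool) (f : α → String) (l : List α) (s : String) :
    l.foldl (fun r x => if p x then r ++ f x else r) s
      = s ++ (l.filter p).foldl (fun r x => r ++ f x) "" := by
  induction l generalizing s with
  | nil => simp
  | cons x xs ih =>
    simp only [List.foldl_cons, List.filter_cons]
    by_cases h : p x = true
    · simp only [h, if_true, List.foldl_cons]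
      rw [ih, foldl_str_append f (xs.filter p) ("" ++ f x)]
      simp [String.append_assoc]
    · simp [h, ih]

-- the reverse single-pass fold computes (number of matches, concatenation of rendered matches)
theorem reverse_fold_eq {α : Type} (p : α → Bool) (f : α → String) (l : List α) :
    l.reverse.foldl (fun (acc : Int × String) x =>
        if p x then (acc.1 + 1, f x ++ acc.2) else acc) (0, "")
      = (((l.filter p).length : Int),
         (l.filter p).foldl (fun r x => r ++ f x) "") := by
  rw [List.foldl_reverse]
  induction l with
  | nil => simp
  | cons x xs ih =>
    simp only [List.foldr_cons, ih, List.filter_cons]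
    by_cases h : p x = true
    · simp only [h, if_true, List.length_cons, List.foldl_cons]
      rw [foldl_str_append f (xs.filter p) ("" ++ f x)]
      refine Prod.ext ?_ ?_
      · push_cast; ring
      · simp
    · simp [h]

-- ===== VERDICT (by name: the statement is the Claim_ definition above) =====
theorem get_by_skill_spec : Claim_equal_get_by_skill := by
  intro skill_name data _ _
  show get_by_skill skill_name data = get_by_skill_alt skill_name data
  simp only [get_by_skill, get_by_skill_alt]
  rw [reverse_fold_eq, PySem.List.foldl_append_if, foldl_str_append_if]
  simp
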